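-- pv_equiv track=rewrite | github.com/Juanshep1/carta | backend/server.py | _description_suggests_media
-- ===== SOURCE A (Python) =====
-- from typing import Optional, Any
--
-- _DRIFT_MEDIA_KINDS: tuple[str, ...] = (
--     # Music
--     "band", "song", "album", "ep", "single", "mixtape", "soundtrack",
--     "rapper", "musician", "singer", "producer", "dj", "record label",
--     "discography",
--     # Film / TV
--     "film", "movie", "documentary", "short film", "tv series", "tv show",
--     "tv episode", "episode", "season", "miniseries", "web series",
--     "anime", "cartoon", "franchise",
--     # Print / interactive
--     "novel", "book", "comic", "manga", "graphic novel",
--     "video game", "mobile game", "board game",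
--     "magazine", "newspaper",
--     # Fictional entities
--     "character", "fictional", "superhero", "supervillain",
--     # Events / venues
--     "concert", "festival", "tournament", "convention", "pageant",
--     "wrestler", "athlete", "actress", "actor",
-- )
--
-- def _description_suggests_media(description: str) -> Optional[str]:
--     """Return the media-kind keyword if the Wikipedia `description` field
--     ("song by Madonna", "2019 American film", "Japanese television
--     drama series") implies the article is a specific media object
--     rather than the general subject. Empty / missing descriptions
--     return None."""
--     if not description:
--         return None
--     d = description.lower()
--     # Sorted longest-first so "tv series" beats "tv".
--     for kw in sorted(_DRIFT_MEDIA_KINDS, key=len, reverse=True):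
--         if kw in d:
--             return kw
--     return None
-- ===== SOURCE B (Python) =====
-- from typing import Optional
--
-- _DRIFT_MEDIA_KINDS: tuple[str, ...] = (
--     "band", "song", "album", "ep", "single", "mixtape", "soundtrack",
--     "rapper", "musician", "singer", "producer", "dj", "record label",
--     "discography",
--     "film", "movie", "documentary", "short film", "tv series", "tv show",
--     "tv episode", "episode", "season", "miniseries", "web series",
--     "anime", "cartoon", "franchise",
--     "novel", "book", "comic", "manga", "graphic novel",
--     "video game", "mobile game", "board game",
--     "magazine", "newspaper",
--     "character", "fictional", "superhero", "supervillain",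
--     "concert", "festival", "tournament", "convention", "pageant",
--     "wrestler", "athlete", "actress", "actor",
-- )
--
-- def _description_suggests_media(description: str) -> Optional[str]:
--     """Single pass over the keywords in original order, keeping the longest
--     match seen so far (strict > keeps the earliest among equal lengths),
--     instead of sorting the tuple longest-first and returning the first hit."""
--     if not description:
--         return None
--     d = description.lower()
--     best = None
--     for kw in _DRIFT_MEDIA_KINDS:
--         if kw in d and (best is None or len(kw) > len(best)):
--             best = kw
--     return best
-- ===== Notes on version B (the rewrite author's own statement) =====
-- stated objective: simpler
-- what changed: B replaces A's sort-the-keywords-longest-first-then-return-first-substring-hit with a single unsorted pass that keeps the longest matching keyword (strict > preserves A's first-in-original-order tie-break).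
import Mathlib
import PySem

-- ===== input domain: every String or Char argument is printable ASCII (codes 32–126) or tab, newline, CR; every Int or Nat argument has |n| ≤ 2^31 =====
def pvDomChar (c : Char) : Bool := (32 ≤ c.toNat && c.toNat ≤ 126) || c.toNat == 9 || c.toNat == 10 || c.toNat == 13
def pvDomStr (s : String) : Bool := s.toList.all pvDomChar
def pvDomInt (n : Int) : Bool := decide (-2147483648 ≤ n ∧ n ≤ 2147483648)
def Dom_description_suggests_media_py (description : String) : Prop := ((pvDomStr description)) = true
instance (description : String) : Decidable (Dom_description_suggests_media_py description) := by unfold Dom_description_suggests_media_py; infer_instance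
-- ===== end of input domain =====

-- B replaces A's sort-then-first-hit with one unsorted pass keeping the longest
-- matching keyword (strict > keeps A's tie-break); objective: simpler.

-- module constant _DRIFT_MEDIA_KINDS (same literal in Source A and Source B)
def pvKinds : List String :=
  ["band", "song", "album", "ep", "single", "mixtape", "soundtrack",
   "rapper", "musician", "singer", "producer", "dj", "record label",
   "discography",
   "film", "movie", "documentary", "short film", "tv series", "tv show",
   "tv episode", "episode", "season", "miniseries", "web series",
   "anime", "cartoon", "franchise",
   "novel", "book", "comic", "manga", "graphic novel",
   "video game", "mobile game", "board game",
   "magazine", "newspaper",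
   "character", "fictional", "superhero", "supervillain",
   "concert", "festival", "tournament", "convention", "pageant",
   "wrestler", "athlete", "actress", "actor"]

-- ===== PORT A =====
-- the 'for kw in …: if kw in d: return kw' loop with early return
def pvAWalk (l : List String) (d : String) : Option String :=
  match l with
  | [] => none
  | kw :: rest => if PySem.Str.isIn kw d then some kw else pvAWalk rest d

def description_suggests_media_py (description : String) : Option String :=
  if description = "" then none
  else
    pvAWalk (PySem.List.sorted pvKinds (fun s => PySem.Str.len s) true)
      (PySem.Str.lower description)

-- ===== PORT B =====
-- one step of B's loop: keep the longest match, strict > (first wins on ties)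
def pvStep (d : String) (best : Option String) (kw : String) : Option String :=
  if PySem.Str.isIn kw d &&
      (match best with
       | none => true
       | some b => decide (PySem.Str.len b < PySem.Str.len kw))
  then some kw else best

def description_suggests_media_py_alt (description : String) : Option String :=
  if description = "" then none
  else pvKinds.foldl (pvStep (PySem.Str.lower description)) none

-- ===== PRECONDITION & SPEC =====
def Spec_description_suggests_media_py (description : String) (out : Option String) : Prop := out = description_suggests_media_py_alt description
instance (description : String) (out : Option String) : Decidable (Spec_description_suggests_media_py description out) := by unfold Spec_description_suggests_media_py; infer_instance

-- ===== CLAIM (what is proved, stated in full; the proofs are below) =====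
def Claim_equal_description_suggests_media_py : Prop := ∀ (description : String), Dom_description_suggests_media_py description → Spec_description_suggests_media_py description (description_suggests_media_py description)

-- ===== LEMMAS AND PROOFS =====

-- proof-side stable descending (by length) insertion: x goes after all
-- elements of length >= its own
def pvIns (x : String) : List String → List String
  | [] => [x]
  | y :: t => if PySem.Str.len y < PySem.Str.len x then x :: y :: t else y :: pvIns x t

lemma pvStep_neg (d x : String) (b : Option String) (hx : PySem.Str.isIn x d = false) :
    pvStep d b x = b := by
  unfold pvStep; rw [hx]; simp

lemma pvStep_none_pos (d x : String) (hx : PySem.Str.isIn x d = true) :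
    pvStep d none x = some x := by
  unfold pvStep; rw [hx]; rfl

lemma pvStep_some_lt (d x b : String) (hx : PySem.Str.isIn x d = true)
    (hlt : PySem.Str.len b < PySem.Str.len x) : pvStep d (some b) x = some x := by
  show (if (PySem.Str.isIn x d && decide (PySem.Str.len b < PySem.Str.len x)) = true
        then some x else some b) = some x
  rw [hx, decide_eq_true hlt]
  rfl

lemma pvStep_some_ge (d x b : String) (hge : PySem.Str.len x ≤ PySem.Str.len b) :
    pvStep d (some b) x = some b := by
  show (if (PySem.Str.isIn x d && decide (PySem.Str.len b < PySem.Str.len x)) = true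
        then some x else some b) = some b
  have hd : decide (PySem.Str.len b < PySem.Str.len x) = false := by
    simp only [decide_eq_false_iff_not]; omega
  rw [hd]; simp

lemma pvAWalk_eq_find (l : List String) (d : String) :
    pvAWalk l d = l.find? (fun kw => PySem.Str.isIn kw d) := by
  induction l with
  | nil => rfl
  | cons kw rest ih =>
    simp only [pvAWalk]
    cases h : PySem.Str.isIn kw d with
    | true => rw [if_pos rfl, List.find?_cons_of_pos (p := fun kw => PySem.Str.isIn kw d) h]
    | false =>
      rw [if_neg (by simp), List.find?_cons_of_neg (p := fun kw => PySem.Str.isIn kw d) (by simpa using h), ih]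

lemma mem_pvIns (b x : String) (s : List String) : b ∈ pvIns x s ↔ b = x ∨ b ∈ s := by
  induction s with
  | nil => simp [pvIns]
  | cons y t ih =>
    simp only [pvIns]
    by_cases h : PySem.Str.len y < PySem.Str.len x
    · rw [if_pos h]
      simp only [List.mem_cons]
    · rw [if_neg h]
      simp only [List.mem_cons, ih]
      tauto

lemma pvIns_desc (x : String) (s : List String)
    (hs : s.Pairwise (fun a b => PySem.Str.len b ≤ PySem.Str.len a)) :
    (pvIns x s).Pairwise (fun a b => PySem.Str.len b ≤ PySem.Str.len a) := by
  induction s with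
  | nil => simp [pvIns]
  | cons y t ih =>
    obtain ⟨hy, ht⟩ := List.pairwise_cons.mp hs
    simp only [pvIns]
    by_cases h : PySem.Str.len y < PySem.Str.len x
    · rw [if_pos h]
      refine List.pairwise_cons.mpr ⟨?_, hs⟩
      intro b hb
      rcases List.mem_cons.mp hb with rfl | hb
      · omega
      · have := hy b hb; omega
    · rw [if_neg h]
      refine List.pairwise_cons.mpr ⟨?_, ih ht⟩
      intro b hb
      rcases (mem_pvIns b x t).mp hb with rfl | hb
      · omega
      · exact hy b hb

lemma find_pvIns (d x : String) (s : List String)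
    (hs : s.Pairwise (fun a b => PySem.Str.len b ≤ PySem.Str.len a)) :
    (pvIns x s).find? (fun kw => PySem.Str.isIn kw d)
      = pvStep d (s.find? (fun kw => PySem.Str.isIn kw d)) x := by
  induction s with
  | nil =>
    simp only [pvIns, List.find?_nil]
    cases hx : PySem.Str.isIn x d with
    | true => rw [List.find?_cons_of_pos (p := fun kw => PySem.Str.isIn kw d) hx, pvStep_none_pos d x hx]
    | false => rw [List.find?_cons_of_neg (p := fun kw => PySem.Str.isIn kw d) (by simpa using hx), List.find?_nil, pvStep_neg d x none hx]
  | cons y t ih =>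
    obtain ⟨hy, ht⟩ := List.pairwise_cons.mp hs
    simp only [pvIns]
    by_cases h : PySem.Str.len y < PySem.Str.len x
    · rw [if_pos h]
      cases hx : PySem.Str.isIn x d with
      | false =>
        rw [List.find?_cons_of_neg (p := fun kw => PySem.Str.isIn kw d) (by simpa using hx), pvStep_neg d x _ hx]
      | true =>
        rw [List.find?_cons_of_pos (p := fun kw => PySem.Str.isIn kw d) hx]
        cases hf : (y :: t).find? (fun kw => PySem.Str.isIn kw d) with
        | none => rw [pvStep_none_pos d x hx]
        | some b =>
          have hb : PySem.Str.len b ≤ PySem.Str.len y := by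
            rcases List.mem_cons.mp (List.mem_of_find?_eq_some hf) with rfl | hm
            · exact le_refl _
            · exact hy b hm
          rw [pvStep_some_lt d x b hx (by omega)]
    · rw [if_neg h]
      cases hyd : PySem.Str.isIn y d with
      | false =>
        rw [List.find?_cons_of_neg (p := fun kw => PySem.Str.isIn kw d) (by simpa using hyd),
            List.find?_cons_of_neg (p := fun kw => PySem.Str.isIn kw d) (by simpa using hyd), ih ht]
      | true =>
        rw [List.find?_cons_of_pos (p := fun kw => PySem.Str.isIn kw d) hyd, List.find?_cons_of_pos (p := fun kw => PySem.Str.isIn kw d) hyd,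
            pvStep_some_ge d x y (by omega)]

lemma foldl_step_eq_find (d : String) (l : List String) (s : List String)
    (hs : s.Pairwise (fun a b => PySem.Str.len b ≤ PySem.Str.len a)) :
    l.foldl (pvStep d) (s.find? (fun kw => PySem.Str.isIn kw d))
      = (l.foldl (fun acc x => pvIns x acc) s).find? (fun kw => PySem.Str.isIn kw d) := by
  induction l generalizing s with
  | nil => rfl
  | cons x rest ih =>
    simp only [List.foldl_cons]
    rw [← find_pvIns d x s hs]
    exact ih (pvIns x s) (pvIns_desc x s hs)

-- the sorted keyword order A uses is the insertion order the invariant names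
lemma sorted_kinds_eq :
    PySem.List.sorted pvKinds (fun s => PySem.Str.len s) true
      = pvKinds.foldl (fun acc x => pvIns x acc) [] := by
  decide

-- ===== VERDICT (by name: the statement is the Claim_ definition above) =====
theorem description_suggests_media_py_spec : Claim_equal_description_suggests_media_py := by
  intro description _
  unfold Spec_description_suggests_media_py description_suggests_media_py
    description_suggests_media_py_alt
  by_cases h : description = ""
  · simp [h]
  · rw [if_neg h, if_neg h]
    rw [pvAWalk_eq_find, sorted_kinds_eq]
    rw [← foldl_step_eq_find _ _ [] (by simp)]
    rfl
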